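-- pv_equiv track=rewrite | github.com/alexodle/vitamind | scripts/forecasts/evaluate_weath.py | max_consecutive_good_days
-- ===== SOURCE A (Python) =====
-- def max_consecutive_good_days(dfs):
--   curr_max = 0
--   curr = 0
--   for df in dfs:
--     if df['isGoodDay']:
--       curr +=1
--       curr_max = max(curr_max, curr)
--     else:
--       curr = 0
--   return curr_max
-- ===== SOURCE B (Python) =====
-- # Two-pointer run scanner: skip bad days, measure each maximal run of good days
-- # in one jump, keep the best run length. Different decomposition from A's fused
-- # running-counter/running-max loop.
-- def max_consecutive_good_days(dfs):
--     bools = [bool(df['isGoodDay']) for df in dfs]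
--     best = 0
--     i = 0
--     n = len(bools)
--     while i < n:
--         if bools[i]:
--             j = i
--             while j < n and bools[j]:
--                 j += 1
--             best = max(best, j - i)
--             i = j
--         else:
--             i += 1
--     return best
-- ===== Notes on version B (the rewrite author's own statement) =====
-- stated objective: alternative
-- what changed: B first extracts the boolean sequence, then scans it with a two-pointer run scanner that jumps over each maximal run of good days at once, instead of A's fused running-counter/running-max fold.
import Mathlib
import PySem

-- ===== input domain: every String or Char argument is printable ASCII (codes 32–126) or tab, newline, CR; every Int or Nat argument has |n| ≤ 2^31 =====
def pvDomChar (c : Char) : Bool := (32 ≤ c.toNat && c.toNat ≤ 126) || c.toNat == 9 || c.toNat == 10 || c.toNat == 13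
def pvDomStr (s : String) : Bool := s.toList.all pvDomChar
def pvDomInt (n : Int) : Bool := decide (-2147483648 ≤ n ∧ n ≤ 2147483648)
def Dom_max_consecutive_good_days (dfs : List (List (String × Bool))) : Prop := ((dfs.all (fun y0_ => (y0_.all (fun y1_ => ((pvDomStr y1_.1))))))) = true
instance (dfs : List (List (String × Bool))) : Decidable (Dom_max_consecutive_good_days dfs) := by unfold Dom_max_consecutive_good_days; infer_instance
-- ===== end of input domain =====

-- B restructures A's fused running-counter/running-max loop into a two-pointer run scanner
-- (objective: alternative decomposition, same O(n) cost). Pre_ excludes dicts missing the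
-- 'isGoodDay' key, on which Python A raises KeyError.

-- ===== PORT A =====
-- df['isGoodDay']: KeyError (excluded by Pre_) modelled by the unreachable default false.
def pvKey (df : List (String × Bool)) : Bool :=
  (PySem.Dict.mk df).getD "isGoodDay" false

def max_consecutive_good_days (dfs : List (List (String × Bool))) : Int :=
  (dfs.foldl (fun (s : Int × Int) df =>
      if pvKey df then (max s.1 (s.2 + 1), s.2 + 1) else (s.1, 0))
    (0, 0)).1

-- ===== PORT B =====
-- length of the leading run of good days (Source B's inner 'while j < n and bools[j]: j += 1')
def pvLead (bs : List Bool) : Int :=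
  ((bs.takeWhile id).length : Int)

-- Source B's outer while loop: skip a bad day, or consume a whole good run and keep the best
def pvScan (best : Int) (bs : List Bool) : Int :=
  match bs with
  | [] => best
  | false :: t => pvScan best t
  | true :: t => pvScan (max best (1 + pvLead t)) (t.dropWhile id)
termination_by bs.length
decreasing_by
  · simp
  · simpa using Nat.lt_succ_of_le (List.length_dropWhile_le id t)

def max_consecutive_good_days_alt (dfs : List (List (String × Bool))) : Int :=
  pvScan 0 (dfs.map pvKey)

-- ===== PRECONDITION & SPEC =====
-- Pre_: every row's dict has the 'isGoodDay' key (otherwise Python A raises KeyError).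
def Pre_max_consecutive_good_days (dfs : List (List (String × Bool))) : Prop :=
  ∀ df ∈ dfs, (PySem.Dict.mk df).contains "isGoodDay" = true
instance (dfs : List (List (String × Bool))) : Decidable (Pre_max_consecutive_good_days dfs) := by unfold Pre_max_consecutive_good_days; infer_instance

def pvWitness_max_consecutive_good_days : (List (List (String × Bool))) :=
  [[("isGoodDay", true)], [("isGoodDay", true)], [("isGoodDay", false)], [("isGoodDay", true)]]

def Spec_max_consecutive_good_days (dfs : List (List (String × Bool))) (out : Int) : Prop := out = max_consecutive_good_days_alt dfs
instance (dfs : List (List (String × Bool))) (out : Int) : Decidable (Spec_max_consecutive_good_days dfs out) := by unfold Spec_max_consecutive_good_days; infer_instance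

-- ===== CLAIM (what is proved, stated in full; the proofs are below) =====
def Claim_equal_max_consecutive_good_days : Prop := ∀ (dfs : List (List (String × Bool))), Dom_max_consecutive_good_days dfs → Pre_max_consecutive_good_days dfs → Spec_max_consecutive_good_days dfs (max_consecutive_good_days dfs)

-- ===== LEMMAS AND PROOFS =====

-- pure (non-accumulator) form of the run scanner, used only in the proofs
def pvGo (bs : List Bool) : Int :=
  match bs with
  | [] => 0
  | false :: t => pvGo t
  | true :: t => max (1 + pvLead t) (pvGo (t.dropWhile id))
termination_by bs.length
decreasing_by
  · simp
  · simpa using Nat.lt_succ_of_le (List.length_dropWhile_le id t)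

theorem pvLead_nonneg (bs : List Bool) : 0 ≤ pvLead bs := by
  simp [pvLead]

theorem pvGo_nonneg (bs : List Bool) : 0 ≤ pvGo bs := by
  fun_induction pvGo with
  | case1 => simp
  | case2 t ih => exact ih
  | case3 t ih =>
    have := pvLead_nonneg t
    omega

theorem pvScan_eq (best : Int) (bs : List Bool) (hb : 0 ≤ best) :
    pvScan best bs = max best (pvGo bs) := by
  induction bs using pvGo.induct generalizing best with
  | case1 => simp [pvScan, pvGo]; omega
  | case2 t ih => simp only [pvScan, pvGo]; exact ih best hb
  | case3 t ih =>
    have hl := pvLead_nonneg t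
    simp only [pvScan, pvGo]
    rw [ih _ (by omega)]
    omega

-- peeling a maximal good run off the front of pvGo
theorem pvGo_peel (bs : List Bool) : pvGo bs = max (pvLead bs) (pvGo (bs.dropWhile id)) := by
  cases bs with
  | nil => simp [pvGo, pvLead]
  | cons b t =>
    cases b with
    | false =>
      have := pvGo_nonneg t
      simp only [pvGo, pvLead, List.takeWhile, List.dropWhile, id]
      simp; omega
    | true =>
      simp only [pvGo, pvLead, List.takeWhile, List.dropWhile, id]
      simp; omega

-- the loop invariant of A's fold: state (m, c) with 0 ≤ c ≤ m
theorem pvFold_inv (t : List Bool) (m c : Int) (hc : 0 ≤ c) (hm : c ≤ m) :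
    (t.foldl (fun (s : Int × Int) b =>
        if b then (max s.1 (s.2 + 1), s.2 + 1) else (s.1, 0)) (m, c)).1
      = max m (max (c + pvLead t) (pvGo (t.dropWhile id))) := by
  induction t generalizing m c with
  | nil =>
    have := pvGo_nonneg ([] : List Bool)
    simp [pvLead, pvGo]; omega
  | cons b t ih =>
    cases b with
    | true =>
      have h1 : c + 1 ≤ max m (c + 1) := le_max_right _ _
      rw [show (List.foldl (fun (s : Int × Int) b =>
            if b then (max s.1 (s.2 + 1), s.2 + 1) else (s.1, 0)) (m, c) (true :: t))
          = (List.foldl (fun (s : Int × Int) b =>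
            if b then (max s.1 (s.2 + 1), s.2 + 1) else (s.1, 0)) (max m (c + 1), c + 1) t)
        from by simp]
      rw [ih (max m (c + 1)) (c + 1) (by omega) h1]
      have hl := pvLead_nonneg t
      simp only [pvLead, List.takeWhile, List.dropWhile, id]
      simp [pvLead] at *
      omega
    | false =>
      rw [show (List.foldl (fun (s : Int × Int) b =>
            if b then (max s.1 (s.2 + 1), s.2 + 1) else (s.1, 0)) (m, c) (false :: t))
          = (List.foldl (fun (s : Int × Int) b =>
            if b then (max s.1 (s.2 + 1), s.2 + 1) else (s.1, 0)) (m, 0) t)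
        from by simp]
      rw [ih m 0 le_rfl (by omega)]
      have hpeel := pvGo_peel t
      have hg := pvGo_nonneg t
      have h1 : pvLead (false :: t) = 0 := by simp [pvLead, List.takeWhile]
      have h2 : (false :: t).dropWhile id = false :: t := by simp [List.dropWhile]
      have h3 : pvGo (false :: t) = pvGo t := by simp [pvGo]
      rw [h1, h2, h3]
      omega

theorem pvFold_eq_go (bs : List Bool) :
    (bs.foldl (fun (s : Int × Int) b =>
        if b then (max s.1 (s.2 + 1), s.2 + 1) else (s.1, 0)) (0, 0)).1 = pvGo bs := by
  rw [pvFold_inv bs 0 0 le_rfl le_rfl]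
  have := pvGo_peel bs
  have := pvGo_nonneg bs
  have := pvLead_nonneg bs
  have := pvGo_nonneg (bs.dropWhile id)
  omega

-- ===== VERDICT (by name: the statement is the Claim_ definition above) =====
theorem max_consecutive_good_days_spec : Claim_equal_max_consecutive_good_days := by
  intro dfs _ _
  unfold Spec_max_consecutive_good_days max_consecutive_good_days max_consecutive_good_days_alt
  rw [pvScan_eq _ _ le_rfl]
  have h := pvFold_eq_go (dfs.map pvKey)
  rw [List.foldl_map] at h
  rw [h]
  have := pvGo_nonneg (dfs.map pvKey)
  omega
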